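-- pv_equiv track=rewrite | github.com/craigbanyard/advent_of_code | 2020/Day06.py | Day06
-- ===== SOURCE A (Python) =====
-- def Day06(data):
--     p1, p2 = 0, 0
--     for group in data:
--         yes = []
--         for person in group:
--             yes.append(set(person))
--         p1 += len(set.union(*yes))
--         p2 += len(set.intersection(*yes))
--     return p1, p2
-- ===== SOURCE B (Python) =====
-- def Day06(data):
--     p1, p2 = 0, 0
--     for group in data:
--         counts = {}
--         for person in group:
--             for ch in set(person):
--                 counts[ch] = counts.get(ch, 0) + 1
--         p1 += len(counts)
--         p2 += sum(1 for v in counts.values() if v == len(group))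
--     return p1, p2
-- ===== Notes on version B (the rewrite author's own statement) =====
-- stated objective: alternative
-- what changed: B replaces the list of per-person sets and varargs set.union/set.intersection with a single per-group frequency table (dict of letter -> number of people who answered it): the union size is the number of keys and the intersection size is the number of keys whose count equals the group size.
-- outside the precondition, e.g. on Day06([[]]): A raises TypeError, B returns (0, 0)
import Mathlib
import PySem

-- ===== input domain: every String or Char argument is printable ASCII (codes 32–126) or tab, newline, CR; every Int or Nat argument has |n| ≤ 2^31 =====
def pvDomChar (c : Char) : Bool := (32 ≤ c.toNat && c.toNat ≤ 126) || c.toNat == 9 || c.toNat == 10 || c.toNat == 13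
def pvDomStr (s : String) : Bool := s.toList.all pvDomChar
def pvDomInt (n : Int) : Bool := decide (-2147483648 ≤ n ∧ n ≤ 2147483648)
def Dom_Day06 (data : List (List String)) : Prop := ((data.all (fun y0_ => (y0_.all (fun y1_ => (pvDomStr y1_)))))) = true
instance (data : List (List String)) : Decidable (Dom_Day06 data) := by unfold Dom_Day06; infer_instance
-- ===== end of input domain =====

-- B replaces the list of per-person sets and varargs set.union/set.intersection with one
-- per-group frequency table (letter -> number of people who answered it): union = number
-- of keys, intersection = keys whose count equals the group size (alternative algorithm).

-- ===== PORT A =====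
-- set.union(*yes) / set.intersection(*yes): Python raises TypeError when yes is empty;
-- that case (excluded by Pre_Day06) is ported as the unchanged accumulator.
def Day06 (data : List (List String)) : Int × Int :=
  data.foldl (fun (acc : Int × Int) group =>
    let yes : List (PySem.Set Char) :=
      group.foldl (fun ys person => ys ++ [PySem.Set.ofList person.toList]) []
    match yes with
    | [] => acc
    | h :: t =>
      (acc.1 + ((t.foldl PySem.Set.union h).length : Int),
       acc.2 + ((t.foldl PySem.Set.inter h).length : Int))) (0, 0)

-- ===== PORT B =====
def Day06_alt (data : List (List String)) : Int × Int :=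
  data.foldl (fun (acc : Int × Int) group =>
    let counts : PySem.Dict Char Int :=
      group.foldl (fun d person =>
        (PySem.Set.ofList person.toList).foldl
          (fun d ch => d.insert ch (d.getD ch 0 + 1)) d) PySem.Dict.empty
    (acc.1 + (counts.size : Int),
     acc.2 + ((counts.values.countP (fun v => v == (group.length : Int))) : Int))) (0, 0)

-- ===== PRECONDITION & SPEC =====
-- Pre_ excludes inputs containing an empty group, on which A's argument-less set.union raises TypeError.
def Pre_Day06 (data : List (List String)) : Prop := [] ∉ data
instance (data : List (List String)) : Decidable (Pre_Day06 data) := by unfold Pre_Day06; infer_instance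
def pvWitness_Day06 : List (List String) := [["abc", "ab"], ["a"]]

def Spec_Day06 (data : List (List String)) (out : Int × Int) : Prop := out = Day06_alt data
instance (data : List (List String)) (out : Int × Int) : Decidable (Spec_Day06 data out) := by unfold Spec_Day06; infer_instance

-- ===== CLAIM (what is proved, stated in full; the proofs are below) =====
def Claim_equal_Day06 : Prop := ∀ (data : List (List String)), Dom_Day06 data → Pre_Day06 data → Spec_Day06 data (Day06 data)

-- ===== LEMMAS AND PROOFS =====

-- named forms of the two loop bodies (definitionally equal to the lambdas in the ports)
def stepA (acc : Int × Int) (group : List String) : Int × Int :=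
  let yes : List (PySem.Set Char) :=
    group.foldl (fun ys person => ys ++ [PySem.Set.ofList person.toList]) []
  match yes with
  | [] => acc
  | h :: t =>
    (acc.1 + ((t.foldl PySem.Set.union h).length : Int),
     acc.2 + ((t.foldl PySem.Set.inter h).length : Int))

def stepB (acc : Int × Int) (group : List String) : Int × Int :=
  let counts : PySem.Dict Char Int :=
    group.foldl (fun d person =>
      (PySem.Set.ofList person.toList).foldl
        (fun d ch => d.insert ch (d.getD ch 0 + 1)) d) PySem.Dict.empty
  (acc.1 + (counts.size : Int),
   acc.2 + ((counts.values.countP (fun v => v == (group.length : Int))) : Int))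

theorem Day06_eq_foldl_stepA (data : List (List String)) : Day06 data = data.foldl stepA (0, 0) := rfl
theorem Day06_alt_eq_foldl_stepB (data : List (List String)) : Day06_alt data = data.foldl stepB (0, 0) := rfl

-- the letters of the group, one copy per person who gave them
def dedupLetters (group : List String) : List Char :=
  group.flatMap (fun p => PySem.Set.ofList p.toList)

-- B's dict is the counter of dedupLetters
theorem counts_eq_counter (group : List String) :
    group.foldl (fun d person =>
      (PySem.Set.ofList person.toList).foldl
        (fun d ch => d.insert ch (d.getD ch 0 + 1)) d) PySem.Dict.empty
    = PySem.Dict.counter (dedupLetters group) := by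
  rw [dedupLetters, ← List.foldl_flatMap, PySem.Dict.foldl_insert_getD_add_one_eq_counter]

theorem mem_dedupLetters (group : List String) (c : Char) :
    c ∈ dedupLetters group ↔ ∃ p ∈ group, c ∈ p.toList := by
  simp [dedupLetters, PySem.Set.mem_ofList]

-- how many copies of c dedupLetters holds: the number of persons whose string contains c
theorem count_dedupLetters (group : List String) (c : Char) :
    (dedupLetters group).count c = group.countP (fun p => decide (c ∈ p.toList)) := by
  induction group with
  | nil => rfl
  | cons p ps ih =>
    have h : dedupLetters (p :: ps) = (PySem.Set.ofList p.toList : List Char) ++ dedupLetters ps := rfl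
    rw [h, List.count_append, ih, List.countP_cons]
    by_cases hc : c ∈ p.toList
    · rw [List.count_eq_one_of_mem (PySem.Set.nodup_ofList _) ((PySem.Set.mem_ofList _ _).mpr hc)]
      simp [hc, Nat.add_comm]
    · rw [List.count_eq_zero_of_not_mem (fun h => hc ((PySem.Set.mem_ofList _ _).mp h))]
      simp [hc]

theorem mem_foldl_union {α : Type} [DecidableEq α] (t : List (List α)) (h : List α) (c : α) :
    c ∈ t.foldl PySem.Set.union h ↔ c ∈ h ∨ ∃ s ∈ t, c ∈ s := by
  induction t generalizing h with
  | nil => simp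
  | cons x xs ih =>
    simp only [List.foldl_cons, ih, PySem.Set.mem_union, List.mem_cons]
    constructor
    · rintro ((hc | hc) | ⟨s, hs, hc⟩)
      · exact Or.inl hc
      · exact Or.inr ⟨x, Or.inl rfl, hc⟩
      · exact Or.inr ⟨s, Or.inr hs, hc⟩
    · rintro (hc | ⟨s, (rfl | hs), hc⟩)
      · exact Or.inl (Or.inl hc)
      · exact Or.inl (Or.inr hc)
      · exact Or.inr ⟨s, hs, hc⟩

theorem mem_foldl_inter {α : Type} [DecidableEq α] (t : List (List α)) (h : List α) (c : α) :
    c ∈ t.foldl PySem.Set.inter h ↔ c ∈ h ∧ ∀ s ∈ t, c ∈ s := by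
  induction t generalizing h with
  | nil => simp
  | cons x xs ih =>
    simp only [List.foldl_cons, ih, PySem.Set.mem_inter, List.mem_cons]
    constructor
    · rintro ⟨⟨hc, hx⟩, hall⟩
      refine ⟨hc, ?_⟩
      rintro s (rfl | hs)
      · exact hx
      · exact hall s hs
    · rintro ⟨hc, hall⟩
      exact ⟨⟨hc, hall x (Or.inl rfl)⟩, fun s hs => hall s (Or.inr hs)⟩

theorem nodup_foldl_union {α : Type} [DecidableEq α] (t : List (List α)) (h : List α)
    (hn : h.Nodup) : (t.foldl PySem.Set.union h).Nodup := by
  induction t generalizing h with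
  | nil => exact hn
  | cons x xs ih => exact ih _ (PySem.Set.nodup_union _ _ hn)

theorem nodup_foldl_inter {α : Type} [DecidableEq α] (t : List (List α)) (h : List α)
    (hn : h.Nodup) : (t.foldl PySem.Set.inter h).Nodup := by
  induction t generalizing h with
  | nil => exact hn
  | cons x xs ih => exact ih _ (PySem.Set.nodup_inter _ _ hn)

theorem length_eq_of_nodup_mem {α : Type} (l₁ l₂ : List α) (h₁ : l₁.Nodup) (h₂ : l₂.Nodup)
    (hm : ∀ x, x ∈ l₁ ↔ x ∈ l₂) : l₁.length = l₂.length :=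
  ((List.perm_ext_iff_of_nodup h₁ h₂).mpr hm).length_eq

-- the union fold has the same size as the set of distinct group letters
theorem union_len_eq (p0 : String) (ps : List String) :
    ((ps.map (fun p => PySem.Set.ofList p.toList)).foldl PySem.Set.union
        (PySem.Set.ofList p0.toList)).length
      = (PySem.Set.ofList (dedupLetters (p0 :: ps))).length := by
  apply length_eq_of_nodup_mem
  · exact nodup_foldl_union _ _ (PySem.Set.nodup_ofList _)
  · exact PySem.Set.nodup_ofList _
  · intro c
    simp only [mem_foldl_union, PySem.Set.mem_ofList, mem_dedupLetters, List.mem_map,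
      List.mem_cons]
    constructor
    · rintro (hc | ⟨s, ⟨p, hp, rfl⟩, hc⟩)
      · exact ⟨p0, Or.inl rfl, hc⟩
      · exact ⟨p, Or.inr hp, by simpa [PySem.Set.mem_ofList] using hc⟩
    · rintro ⟨p, (rfl | hp), hc⟩
      · exact Or.inl hc
      · exact Or.inr ⟨PySem.Set.ofList p.toList, ⟨p, hp, rfl⟩, by simpa [PySem.Set.mem_ofList] using hc⟩

-- the intersection fold has the size of {distinct letters answered by all persons}
theorem inter_len_eq (p0 : String) (ps : List String) :
    ((ps.map (fun p => PySem.Set.ofList p.toList)).foldl PySem.Set.inter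
        (PySem.Set.ofList p0.toList)).length
      = (PySem.Set.ofList (dedupLetters (p0 :: ps))).countP
          (fun ch => decide (∀ p ∈ (p0 :: ps), ch ∈ p.toList)) := by
  rw [List.countP_eq_length_filter]
  apply length_eq_of_nodup_mem
  · exact nodup_foldl_inter _ _ (PySem.Set.nodup_ofList _)
  · exact (PySem.Set.nodup_ofList _).filter _
  · intro c
    simp only [mem_foldl_inter, List.mem_filter, PySem.Set.mem_ofList, mem_dedupLetters,
      List.mem_map, List.mem_cons, decide_eq_true_eq]
    constructor
    · rintro ⟨hc0, hall⟩
      have hall' : ∀ p ∈ ps, c ∈ p.toList := fun p hp => by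
        simpa [PySem.Set.mem_ofList] using hall _ ⟨p, hp, rfl⟩
      refine ⟨⟨p0, Or.inl rfl, hc0⟩, ?_⟩
      rintro p (rfl | hp)
      · exact hc0
      · exact hall' p hp
    · rintro ⟨_, hall⟩
      refine ⟨hall p0 (Or.inl rfl), ?_⟩
      rintro s ⟨p, hp, rfl⟩
      simpa [PySem.Set.mem_ofList] using hall p (Or.inr hp)

-- for a letter of the group: answered by everyone ↔ its count equals the group size
theorem count_eq_length_iff (group : List String) (c : Char) :
    (((dedupLetters group).count c : Int) == (group.length : Int))
      = decide (∀ p ∈ group, c ∈ p.toList) := by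
  rw [count_dedupLetters]
  rcases Bool.eq_false_or_eq_true (decide (∀ p ∈ group, c ∈ p.toList)) with h | h
  case inl =>
    rw [h]
    replace h := of_decide_eq_true h
    have : group.countP (fun p => decide (c ∈ p.toList)) = group.length :=
      List.countP_eq_length.mpr (fun p hp => by simpa using h p hp)
    simp [this]
  case inr =>
    rw [h]
    replace h := of_decide_eq_false h
    apply beq_eq_false_iff_ne.mpr
    intro hc
    have : group.countP (fun p => decide (c ∈ p.toList)) = group.length := by exact_mod_cast hc
    exact h (by simpa using List.countP_eq_length.mp this)

theorem step_eq (acc : Int × Int) (g : List String) (hg : g ≠ []) : stepA acc g = stepB acc g := by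
  obtain ⟨p0, ps, rfl⟩ := List.exists_cons_of_ne_nil hg
  unfold stepA stepB
  simp only
  rw [PySem.List.foldl_append_singleton_eq_map, counts_eq_counter]
  simp only [List.nil_append, List.map_cons]
  have hvals : (PySem.Dict.counter (dedupLetters (p0 :: ps))).values
      = (PySem.Set.ofList (dedupLetters (p0 :: ps))).map
          (fun k => ((dedupLetters (p0 :: ps)).count k : Int)) := by
    show ((PySem.Dict.counter (dedupLetters (p0 :: ps))).items.map (·.2)) = _
    rw [PySem.Dict.items_counter, List.map_map]
    rfl
  have hsize : (PySem.Dict.counter (dedupLetters (p0 :: ps))).size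
      = (PySem.Set.ofList (dedupLetters (p0 :: ps))).length := by
    show ((PySem.Dict.counter (dedupLetters (p0 :: ps))).items.length) = _
    rw [PySem.Dict.items_counter, List.length_map]
  rw [hvals, hsize, union_len_eq, inter_len_eq, List.countP_map]
  have hcong : List.countP
      ((fun v => v == ((p0 :: ps).length : Int)) ∘
        fun k => ((dedupLetters (p0 :: ps)).count k : Int))
      (PySem.Set.ofList (dedupLetters (p0 :: ps)))
      = List.countP (fun ch => decide (∀ p ∈ (p0 :: ps), ch ∈ p.toList))
          (PySem.Set.ofList (dedupLetters (p0 :: ps))) :=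
    List.countP_congr (fun c _ => by rw [Function.comp_apply, count_eq_length_iff])
  rw [hcong]

theorem foldl_step_eq (data : List (List String)) (acc : Int × Int)
    (h : ∀ g ∈ data, g ≠ []) : data.foldl stepA acc = data.foldl stepB acc := by
  induction data generalizing acc with
  | nil => rfl
  | cons g gs ih =>
    simp only [List.foldl_cons]
    rw [step_eq acc g (h g List.mem_cons_self)]
    exact ih _ (fun g' hg' => h g' (List.mem_cons_of_mem _ hg'))

-- ===== VERDICT (by name: the statement is the Claim_ definition above) =====
theorem Day06_spec : Claim_equal_Day06 := by
  intro data _ hpre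
  unfold Spec_Day06
  rw [Day06_eq_foldl_stepA, Day06_alt_eq_foldl_stepB]
  exact foldl_step_eq data (0, 0) (fun g hg h => hpre (h ▸ hg))
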